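-- pv_equiv track=rewrite | github.com/lilleswing/adventcode | 2019/aoc2019/day05.py | _zero_pad
-- ===== SOURCE A (Python) =====
-- def _zero_pad(i, op_numbers):
--     """
--     return 0 padded op code to account for all the ops
--     """
--     length = op_numbers + 2
--     s = str(i)
--     while len(s) < length:
--         s = "0" + s
--     l = [int(x) for x in s]
--     modes = l[:-2]
--     return modes[::-1]
-- ===== SOURCE B (Python) =====
-- def _zero_pad(i, op_numbers):
--     count = max(len(str(i)), op_numbers + 2) - 2
--     q = i // 100
--     modes = []
--     for _ in range(count):
--         modes.append(q % 10)
--         q //= 10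
--     return modes
-- ===== Notes on version B (the rewrite author's own statement) =====
-- stated objective: faster
-- what changed: B extracts the parameter modes arithmetically (q = i // 100, then repeatedly take q % 10 and q //= 10, for max(len(str(i)), op_numbers+2)-2 digits) instead of A's repeated '0'+s string prepending, per-character int() conversion, slice and reverse; Pre_ excludes negative i, on which A raises ValueError (int('-')).
import Mathlib
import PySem

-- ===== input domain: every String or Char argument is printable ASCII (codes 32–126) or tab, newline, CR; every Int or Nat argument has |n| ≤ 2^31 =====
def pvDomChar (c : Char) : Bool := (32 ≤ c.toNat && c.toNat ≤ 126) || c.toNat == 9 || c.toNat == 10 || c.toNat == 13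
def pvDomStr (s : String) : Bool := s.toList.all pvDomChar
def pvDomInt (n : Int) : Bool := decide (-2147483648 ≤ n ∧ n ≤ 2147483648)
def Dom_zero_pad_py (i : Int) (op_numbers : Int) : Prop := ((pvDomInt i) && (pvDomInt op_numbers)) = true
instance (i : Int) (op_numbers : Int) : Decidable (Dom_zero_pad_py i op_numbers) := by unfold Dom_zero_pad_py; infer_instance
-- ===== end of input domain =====

-- B extracts the mode digits arithmetically (q = i // 100, then repeatedly q % 10, q //= 10)
-- instead of A's repeated-prepend zero padding, per-character int(), slice and reverse (objective: faster).

-- ===== PORT A =====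
-- A's `while len(s) < length: s = "0" + s` loop, on the character list
def zeroPadLoop (len : Int) (s : List Char) : List Char :=
  if (s.length : Int) < len then zeroPadLoop len ('0' :: s) else s
termination_by (len - s.length).toNat
decreasing_by simp; omega

def zero_pad_py (i : Int) (op_numbers : Int) : List Int :=
  let length := op_numbers + 2
  let s := (PySem.Int.toStr i).toList
  let s := zeroPadLoop length s
  -- int(x) for a single char x: PySem.Int.ofChars? [x]; it is `some` on every char of s
  -- whenever Pre_ holds (0 ≤ i means every char is a decimal digit); A raises otherwise.
  let l := s.map (fun x => (PySem.Int.ofChars? [x]).getD 0)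
  let modes := PySem.List.slice l none (some (-2))
  modes.reverse

-- ===== PORT B =====
def zero_pad_py_alt (i : Int) (op_numbers : Int) : List Int :=
  let count := max (PySem.Str.len (PySem.Int.toStr i)) (op_numbers + 2) - 2
  let q := PySem.Int.floordiv i 100
  let res := (PySem.List.pyRange 0 count 1).foldl
      (fun (st : List Int × Int) _ =>
        (st.1 ++ [PySem.Int.mod st.2 10], PySem.Int.floordiv st.2 10))
      ([], q)
  res.1

-- ===== PRECONDITION & SPEC =====
-- Pre_ excludes exactly negative i: there str(i) starts with '-' and A's `int(x)`
-- per-character conversion raises ValueError on the '-' character.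
def Pre_zero_pad_py (i : Int) (op_numbers : Int) : Prop := 0 ≤ i
instance (i : Int) (op_numbers : Int) : Decidable (Pre_zero_pad_py i op_numbers) := by unfold Pre_zero_pad_py; infer_instance
def pvWitness_zero_pad_py : Int × Int := (1002, 3)

def Spec_zero_pad_py (i : Int) (op_numbers : Int) (out : List Int) : Prop := out = zero_pad_py_alt i op_numbers
instance (i : Int) (op_numbers : Int) (out : List Int) : Decidable (Spec_zero_pad_py i op_numbers out) := by unfold Spec_zero_pad_py; infer_instance

-- ===== CLAIM (what is proved, stated in full; the proofs are below) =====
def Claim_equal_zero_pad_py : Prop := ∀ (i : Int) (op_numbers : Int), Dom_zero_pad_py i op_numbers → Pre_zero_pad_py i op_numbers → Spec_zero_pad_py i op_numbers (zero_pad_py i op_numbers)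

-- ===== LEMMAS AND PROOFS =====

-- digits of n, LSB first, with at least one digit (as str(n) prints at least "0")
def dsFun (n : ℕ) : List ℕ := if n = 0 then [0] else Nat.digits 10 n

lemma digitsGetD (j n : ℕ) : (Nat.digits 10 n).getD j 0 = n / 10 ^ j % 10 := by
  induction j generalizing n with
  | zero =>
    rcases Nat.eq_zero_or_pos n with h | h
    · simp [h]
    · rw [Nat.digits_def' (by norm_num : (1:ℕ) < 10) h]; simp
  | succ j ih =>
    rcases Nat.eq_zero_or_pos n with h | h
    · simp [h]
    · rw [Nat.digits_def' (by norm_num : (1:ℕ) < 10) h]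
      simp only [List.getD_cons_succ]
      rw [ih, Nat.div_div_eq_div_mul, pow_succ, mul_comm]

lemma dsGetD (n j : ℕ) : (dsFun n).getD j 0 = n / 10 ^ j % 10 := by
  unfold dsFun
  split_ifs with h
  · subst h; cases j <;> simp
  · exact digitsGetD j n

lemma dsLt (n : ℕ) : ∀ x ∈ dsFun n, x < 10 := by
  unfold dsFun
  split_ifs with h
  · simp
  · intro x hx; exact Nat.digits_lt_base (by norm_num) hx

lemma dsLenPos (n : ℕ) : 0 < (dsFun n).length := by
  unfold dsFun
  split_ifs with h
  · simp
  · simpa [List.length_pos_iff] using Nat.digits_ne_nil_iff_ne_zero.mpr h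

lemma nLtPow (n : ℕ) : n < 10 ^ (dsFun n).length := by
  unfold dsFun
  split_ifs with h
  · simp [h]
  · exact (Nat.digits_length_le_iff (by norm_num) n).mp le_rfl

lemma tdcEq : ∀ (f n : ℕ) (l : List Char), 0 < n → n < f →
    Nat.toDigitsCore 10 f n l = ((Nat.digits 10 n).map Nat.digitChar).reverse ++ l := by
  intro f
  induction f with
  | zero => intro n l h1 h2; omega
  | succ f ih =>
    intro n l h1 h2
    rw [Nat.toDigitsCore]
    by_cases h : n / 10 = 0
    · simp only [h, if_true]
      rw [Nat.digits_def' (by norm_num : (1:ℕ) < 10) h1, h]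
      simp
    · simp only [h, if_false]
      have hlt : n / 10 < n := Nat.div_lt_self h1 (by norm_num)
      rw [ih (n / 10) _ (Nat.pos_of_ne_zero h) (by omega)]
      rw [Nat.digits_def' (by norm_num : (1:ℕ) < 10) h1]
      simp

lemma toCharsEq (n : ℕ) : PySem.Int.toChars (n : ℤ) = ((dsFun n).map Nat.digitChar).reverse := by
  unfold PySem.Int.toChars dsFun
  rw [if_neg (by omega)]
  split_ifs with h
  · subst h; decide
  · rw [Int.toNat_natCast]
    have := tdcEq (n + 1) n [] (Nat.pos_of_ne_zero h) (by omega)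
    simpa [Nat.toDigits] using this

lemma valDigitChar (d : ℕ) (h : d < 10) :
    (PySem.Int.ofChars? [Nat.digitChar d]).getD 0 = (d : ℤ) := by
  interval_cases d <;> decide

lemma zeroPadLoop_eq (L : Int) (s : List Char) :
    zeroPadLoop L s = List.replicate (L - s.length).toNat '0' ++ s := by
  generalize hk : (L - (s.length : Int)).toNat = k
  induction k generalizing s with
  | zero =>
    rw [zeroPadLoop, if_neg (by omega)]
    simp
  | succ k ih =>
    rw [zeroPadLoop, if_pos (by omega)]
    rw [ih ('0' :: s) (by simp; omega)]
    rw [List.replicate_succ', List.append_assoc]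
    rfl

-- the value at distance j from the RIGHT end of the zero-padded digit string of n
lemma paddedDigit (n z j : ℕ) (hj : j < z + (dsFun n).length)
    (h : z + (dsFun n).length - 1 - j
        < (List.replicate z '0' ++ ((dsFun n).map Nat.digitChar).reverse).length) :
    (PySem.Int.ofChars? [(List.replicate z '0'
        ++ ((dsFun n).map Nat.digitChar).reverse)[z + (dsFun n).length - 1 - j]'h]).getD 0
      = ((n / 10 ^ j % 10 : ℕ) : ℤ) := by
  have hlen0 : 0 < (dsFun n).length := dsLenPos n
  rw [List.getElem_append]
  split_ifs with hlt
  · -- a padding '0'; there (dsFun n).length ≤ j, so the arithmetic digit is 0 too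
    rw [List.getElem_replicate]
    have hge : (dsFun n).length ≤ j := by
      simp only [List.length_replicate] at hlt
      omega
    rw [Nat.div_eq_of_lt (lt_of_lt_of_le (nLtPow n)
      (Nat.pow_le_pow_right (by norm_num) hge))]
    decide
  · -- inside the digits of n
    simp only [List.length_replicate] at hlt
    have hjl : j < (dsFun n).length := by omega
    rw [List.getElem_reverse]
    have hidx : ((dsFun n).map Nat.digitChar).length - 1
        - (z + (dsFun n).length - 1 - j - (List.replicate z '0').length) = j := by
      simp only [List.length_map, List.length_replicate]
      omega
    rw [getElem_congr_idx hidx, List.getElem_map]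
    rw [valDigitChar _ (dsLt n _ (List.getElem_mem _))]
    have hv := dsGetD n j
    rw [List.getD_eq_getElem _ _ hjl] at hv
    exact_mod_cast hv

-- B's digit-extraction loop: q starts at the Nat value q0 and is divided by 10 each step
lemma foldlDigits (l : List Int) (acc : List Int) (q0 : ℕ) :
    l.foldl (fun (st : List Int × Int) _ =>
        (st.1 ++ [PySem.Int.mod st.2 10], PySem.Int.floordiv st.2 10)) (acc, (q0 : ℤ))
      = (acc ++ (List.range l.length).map (fun k => ((q0 / 10 ^ k % 10 : ℕ) : ℤ)),
         ((q0 / 10 ^ l.length : ℕ) : ℤ)) := by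
  induction l generalizing acc q0 with
  | nil => simp
  | cons x l ih =>
    simp only [List.foldl_cons]
    rw [PySem.Int.mod_eq_emod_of_pos (by norm_num),
        PySem.Int.floordiv_eq_ediv_of_pos (by norm_num)]
    have hm : (q0 : ℤ) % 10 = ((q0 % 10 : ℕ) : ℤ) := by push_cast; ring
    have hd : (q0 : ℤ) / 10 = ((q0 / 10 : ℕ) : ℤ) := by
      rw [Int.natCast_div]; push_cast; ring
    rw [hm, hd, ih]
    simp only [List.length_cons, Prod.mk.injEq]
    refine ⟨?_, ?_⟩
    · rw [List.range_succ_eq_map, List.map_cons, List.map_map]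
      simp only [pow_zero, Nat.div_one, List.append_assoc, List.singleton_append]
      congr 2
      apply List.map_congr_left
      intro k _
      simp only [Function.comp_apply]
      rw [Nat.div_div_eq_div_mul, ← pow_succ']
    · rw [Nat.div_div_eq_div_mul, ← pow_succ']

lemma sliceTo2 (xs : List Int) :
    PySem.List.slice xs none (some (-2)) = xs.take (xs.length - 2) := by
  simp [PySem.List.slice]

theorem zero_pad_py_spec : Claim_equal_zero_pad_py := by
  intro i op_numbers _ hp
  unfold Spec_zero_pad_py
  obtain ⟨n, rfl⟩ : ∃ n : ℕ, i = (n : ℤ) := ⟨i.toNat, (Int.toNat_of_nonneg hp).symm⟩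
  simp only [zero_pad_py, zero_pad_py_alt]
  set L : ℤ := op_numbers + 2 with hL
  set ds := dsFun n with hds
  set len0 := ds.length with hlen0
  have hs0 : (PySem.Int.toStr (n : ℤ)).toList = (ds.map Nat.digitChar).reverse := by
    rw [PySem.Int.toList_toStr]; exact toCharsEq n
  set z : ℕ := (L - (len0 : ℤ)).toNat with hz
  have hpad : zeroPadLoop L (PySem.Int.toStr (n : ℤ)).toList
      = List.replicate z '0' ++ (ds.map Nat.digitChar).reverse := by
    rw [hs0, zeroPadLoop_eq]
    congr 2
    simp only [List.length_reverse, List.length_map, hz, hlen0]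
  rw [hpad, sliceTo2]
  -- canonical forms
  set p : ℕ := z + len0 with hp2
  have hlp : ((List.replicate z '0' ++ (ds.map Nat.digitChar).reverse).map
      (fun x => (PySem.Int.ofChars? [x]).getD 0)).length = p := by
    simp [hp2]; omega
  have hlen0pos : 0 < len0 := dsLenPos n
  have hcount : max (PySem.Str.len (PySem.Int.toStr (n : ℤ))) L - 2
      = (p : ℤ) - 2 := by
    rw [PySem.Str.len_eq, hs0]
    simp only [List.length_reverse, List.length_map]
    rw [← hlen0]
    omega
  have hq : PySem.Int.floordiv (n : ℤ) 100 = ((n / 100 : ℕ) : ℤ) := by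
    rw [PySem.Int.floordiv_eq_ediv_of_pos (by norm_num), Int.natCast_div]
    push_cast
    ring
  rw [hcount, hq, foldlDigits]
  have hlen : (PySem.List.pyRange 0 ((p : ℤ) - 2) 1).length = p - 2 := by
    rw [PySem.List.length_pyRange_one]
    omega
  rw [hlen]
  have hdiv : ∀ k : ℕ, n / 100 / 10 ^ k % 10 = n / 10 ^ (k + 2) % 10 := by
    intro k
    rw [Nat.div_div_eq_div_mul]
    congr 2
    rw [pow_succ, pow_succ]
    ring
  apply List.ext_getElem
  · simp only [List.length_reverse, List.length_take, List.nil_append, List.length_map,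
      List.length_range, hlp]
    omega
  · intro k h1 h2
    simp only [List.nil_append, List.getElem_map, List.getElem_range, List.getElem_reverse,
      List.getElem_take]
    rw [hdiv k]
    have hk : k < p - 2 := by
      simpa using h2
    have hidx : (List.take
        (((List.replicate z '0' ++ (ds.map Nat.digitChar).reverse).map
          (fun x => (PySem.Int.ofChars? [x]).getD 0)).length - 2)
        ((List.replicate z '0' ++ (ds.map Nat.digitChar).reverse).map
          (fun x => (PySem.Int.ofChars? [x]).getD 0))).length - 1 - k
        = z + (dsFun n).length - 1 - (k + 2) := by
      simp only [List.length_take, hlp]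
      rw [← hds, ← hlen0]
      omega
    rw [getElem_congr_idx hidx]
    exact paddedDigit n z (k + 2) (by rw [← hds, ← hlen0]; omega) _
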